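-- pv_equiv track=rewrite | github.com/LuYonghao/Hadoop-spark-streaming | Project/sparkSentiment_app.py | topic_sort
-- ===== SOURCE A (Python) =====
-- dic = {'Apple': ["#iphone", "#apple", "#ipad", "#ipod", "#applewatch", "#imac", "#macbookpro", "#iphoneonly", "#iphone12",
--          "#iphonephoto"],
--        'Google': ["#pixel", "#firebase", "#google", "#chromebook", "#googlehome", "#chromecast", "#googlehomemini", "#pixel3",
--           "#googleassistant", "#dialogflow"],
--        'Microsoft': ["#microsoftoffice", "#powerpoint", "#microsoftword", "#excel", "#surfacepro", "#azure", "#office360",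
--              "#surface", "#xbox", "#windows"],
--        'Samsung': ["#samsung", "#galaxy", "#galaxyfold", "#foldphone", "#SamsungSam", "#GalaxyS21", "#GalaxyNote20",
--            "#GalaxyZFold2", "#GalaxyA", "#GalaxyBook"],
--        'amazon': ["#alexa", "#echo", "#echodot", "#kindle", "#aws", "#amazonprime", "#amazonvideo", "#amazon", "#amazonmusic",
--           "#audible"]}
--
-- def topic_sort(line):
--     res = ""
--     for word in line.split(" "):
--         for key in dic.keys():
--             for value in dic[key]:
--                 if value == word.lower():
--                     res = key
--     return res
-- ===== SOURCE B (Python) =====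
-- # Reverse index precomputed once: hashtag text without its leading '#' -> company key.
-- # (Mixed-case entries like "SamsungSam" are kept verbatim: the lowercased word can
-- # never equal them, exactly as in the original comparison against word.lower().)
-- _TAG2KEY = {
--     "iphone": "Apple", "apple": "Apple", "ipad": "Apple", "ipod": "Apple", "applewatch": "Apple",
--     "imac": "Apple", "macbookpro": "Apple", "iphoneonly": "Apple", "iphone12": "Apple", "iphonephoto": "Apple",
--     "pixel": "Google", "firebase": "Google", "google": "Google", "chromebook": "Google", "googlehome": "Google",
--     "chromecast": "Google", "googlehomemini": "Google", "pixel3": "Google", "googleassistant": "Google", "dialogflow": "Google",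
--     "microsoftoffice": "Microsoft", "powerpoint": "Microsoft", "microsoftword": "Microsoft", "excel": "Microsoft", "surfacepro": "Microsoft",
--     "azure": "Microsoft", "office360": "Microsoft", "surface": "Microsoft", "xbox": "Microsoft", "windows": "Microsoft",
--     "samsung": "Samsung", "galaxy": "Samsung", "galaxyfold": "Samsung", "foldphone": "Samsung", "SamsungSam": "Samsung",
--     "GalaxyS21": "Samsung", "GalaxyNote20": "Samsung", "GalaxyZFold2": "Samsung", "GalaxyA": "Samsung", "GalaxyBook": "Samsung",
--     "alexa": "amazon", "echo": "amazon", "echodot": "amazon", "kindle": "amazon", "aws": "amazon",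
--     "amazonprime": "amazon", "amazonvideo": "amazon", "amazon": "amazon", "amazonmusic": "amazon", "audible": "amazon",
-- }
--
-- def topic_sort(line):
--     # Forward last-match equals reverse first-match (each hashtag belongs to one
--     # company only), so scan the words back to front and stop at the first hit;
--     # only '#'-words can match, so look up the tag behind the '#'.
--     for word in reversed(line.split(" ")):
--         w = word.lower()
--         if w.startswith("#"):
--             key = _TAG2KEY.get(w[1:])
--             if key is not None:
--                 return key
--     return ""
-- ===== Notes on version B (the rewrite author's own statement) =====
-- stated objective: faster
-- what changed: Replaces the triple nested last-wins scan (words x dict keys x hashtag lists, 50 string comparisons per word) by a precomputed literal reverse index mapping each hashtag's text (without its leading '#') to its company key, consulted in an early-returning reverse word loop: forward last-match equals reverse first-match because each hashtag belongs to exactly one company.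
import Mathlib
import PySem

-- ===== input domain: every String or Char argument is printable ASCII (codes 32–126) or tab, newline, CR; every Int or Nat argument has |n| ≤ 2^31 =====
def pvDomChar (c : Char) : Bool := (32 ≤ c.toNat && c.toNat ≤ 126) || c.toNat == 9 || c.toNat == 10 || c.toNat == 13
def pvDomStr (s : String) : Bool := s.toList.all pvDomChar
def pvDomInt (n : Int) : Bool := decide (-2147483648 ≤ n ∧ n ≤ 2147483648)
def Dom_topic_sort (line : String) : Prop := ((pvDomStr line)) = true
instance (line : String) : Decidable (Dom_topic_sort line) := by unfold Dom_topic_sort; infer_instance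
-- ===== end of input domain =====

-- B replaces A's triple nested last-wins scan by a precomputed reverse index
-- (hashtag text without its '#' → company key) consulted during an
-- early-returning reverse traversal of the words (objective: faster, constant factor).

-- ===== PORT A =====
-- the module-level dict of A, in Python insertion order
def dicPairs : List (String × List String) :=
  [("Apple", ["#iphone", "#apple", "#ipad", "#ipod", "#applewatch", "#imac", "#macbookpro", "#iphoneonly", "#iphone12",
              "#iphonephoto"]),
   ("Google", ["#pixel", "#firebase", "#google", "#chromebook", "#googlehome", "#chromecast", "#googlehomemini", "#pixel3",
               "#googleassistant", "#dialogflow"]),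
   ("Microsoft", ["#microsoftoffice", "#powerpoint", "#microsoftword", "#excel", "#surfacepro", "#azure", "#office360",
                  "#surface", "#xbox", "#windows"]),
   ("Samsung", ["#samsung", "#galaxy", "#galaxyfold", "#foldphone", "#SamsungSam", "#GalaxyS21", "#GalaxyNote20",
                "#GalaxyZFold2", "#GalaxyA", "#GalaxyBook"]),
   ("amazon", ["#alexa", "#echo", "#echodot", "#kindle", "#aws", "#amazonprime", "#amazonvideo", "#amazon", "#amazonmusic",
               "#audible"])]

-- line.split(" ") with a nonempty separator is always 'some'; .getD [] only discharges the option
def topic_sort (line : String) : String :=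
  ((PySem.Str.split? line " ").getD []).foldl
    (fun res word =>
      dicPairs.foldl
        (fun r kv =>
          kv.2.foldl (fun r2 v => if v == PySem.Str.lower word then kv.1 else r2) r)
        res)
    ""

-- ===== PORT B =====
-- the module-level dict literal _TAG2KEY of Source B (stripped hashtag → company key)
def pvTAG2KEY : PySem.Dict String String := PySem.Dict.ofList
  [("iphone", "Apple"), ("apple", "Apple"), ("ipad", "Apple"), ("ipod", "Apple"),
   ("applewatch", "Apple"), ("imac", "Apple"), ("macbookpro", "Apple"), ("iphoneonly", "Apple"),
   ("iphone12", "Apple"), ("iphonephoto", "Apple"), ("pixel", "Google"), ("firebase", "Google"),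
   ("google", "Google"), ("chromebook", "Google"), ("googlehome", "Google"), ("chromecast", "Google"),
   ("googlehomemini", "Google"), ("pixel3", "Google"), ("googleassistant", "Google"), ("dialogflow", "Google"),
   ("microsoftoffice", "Microsoft"), ("powerpoint", "Microsoft"), ("microsoftword", "Microsoft"), ("excel", "Microsoft"),
   ("surfacepro", "Microsoft"), ("azure", "Microsoft"), ("office360", "Microsoft"), ("surface", "Microsoft"),
   ("xbox", "Microsoft"), ("windows", "Microsoft"), ("samsung", "Samsung"), ("galaxy", "Samsung"),
   ("galaxyfold", "Samsung"), ("foldphone", "Samsung"), ("SamsungSam", "Samsung"), ("GalaxyS21", "Samsung"),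
   ("GalaxyNote20", "Samsung"), ("GalaxyZFold2", "Samsung"), ("GalaxyA", "Samsung"), ("GalaxyBook", "Samsung"),
   ("alexa", "amazon"), ("echo", "amazon"), ("echodot", "amazon"), ("kindle", "amazon"),
   ("aws", "amazon"), ("amazonprime", "amazon"), ("amazonvideo", "amazon"), ("amazon", "amazon"),
   ("amazonmusic", "amazon"), ("audible", "amazon")]

-- the early-returning reverse loop of Source B over the (already reversed) word list
-- (the dict is a parameter so the equation lemmas stay small; only applied to pvTAG2KEY)
def pvScan (m : PySem.Dict String String) : List String → String
  | [] => ""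
  | word :: rest =>
    let w := PySem.Str.lower word
    if PySem.Str.startswith w "#" then
      match m.get? (PySem.Str.slice w (some 1) none) with
      | some key => key
      | none => pvScan m rest
    else pvScan m rest

def topic_sort_alt (line : String) : String :=
  pvScan pvTAG2KEY ((PySem.Str.split? line " ").getD []).reverse

-- ===== PRECONDITION & SPEC =====
def Spec_topic_sort (line : String) (out : String) : Prop := out = topic_sort_alt line
instance (line : String) (out : String) : Decidable (Spec_topic_sort line out) := by unfold Spec_topic_sort; infer_instance

-- ===== CLAIM =====
def Claim_equal_topic_sort : Prop := ∀ (line : String), Dom_topic_sort line → Spec_topic_sort line (topic_sort line)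

-- ===== LEMMAS AND PROOFS =====

-- hashtag membership as an Option-valued search (A's value for one word)
def pvKeyOf (wl : String) (kv : String × List String) : Option String :=
  if wl ∈ kv.2 then some kv.1 else none

-- B's test-and-lookup for one (already lowercased) word
def pvLook (wl : String) : Option String :=
  if PySem.Str.startswith wl "#" then pvTAG2KEY.get? (PySem.Str.slice wl (some 1) none) else none

-- innermost loop of A: last-wins over one hashtag list is just membership
theorem pvFoldlEqIte (vs : List String) (wl k r : String) :
    vs.foldl (fun r2 v => if v == wl then k else r2) r = if wl ∈ vs then k else r := by
  induction vs generalizing r with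
  | nil => simp
  | cons v t ih =>
    simp only [List.foldl_cons, ih, List.mem_cons]
    by_cases h : v = wl
    · simp [h]
    · simp [beq_iff_eq, h, Ne.symm h]

-- a last-wins foldl is the getD of a reversed first-match search
theorem pvFoldlGetD {α β : Type} (g : α → Option β) (l : List α) (r : β) :
    l.foldl (fun acc a => (g a).getD acc) r = (l.reverse.findSome? g).getD r := by
  induction l generalizing r with
  | nil => simp
  | cons a t ih =>
    simp only [List.foldl_cons, List.reverse_cons, List.findSome?_append, ih]
    cases h : t.reverse.findSome? g <;> cases h2 : g a <;>
      simp [h2, Option.or]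

-- a first-match search is order-independent when at most one element can match
theorem pvFindSomeRev {α β : Type} (g : α → Option β) (l : List α)
    (h : l.Pairwise (fun a b => g a = none ∨ g b = none)) :
    l.reverse.findSome? g = l.findSome? g := by
  induction l with
  | nil => simp
  | cons a t ih =>
    have hpair := (List.pairwise_cons.mp h).1
    have htail := (List.pairwise_cons.mp h).2
    simp only [List.reverse_cons, List.findSome?_append, ih htail]
    cases ha : g a with
    | none => cases ht : t.findSome? g <;> simp [ha, ht, Option.or]
    | some b =>
      have ht : t.findSome? g = none := by
        rw [List.findSome?_eq_none_iff]
        intro x hx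
        rcases hpair x hx with h1 | h1
        · rw [ha] at h1; exact absurd h1 (by simp)
        · exact h1
      simp [ha, ht, Option.or]

-- the five hashtag lists are pairwise disjoint
set_option maxRecDepth 16384 in
theorem pvDisjoint : dicPairs.Pairwise (fun a b => ∀ x, x ∈ a.2 → x ∉ b.2) := by decide

-- pairwise disjointness transfers to the Option-valued search
theorem pvPairwiseKeyOf (wl : String) :
    dicPairs.Pairwise (fun a b => pvKeyOf wl a = none ∨ pvKeyOf wl b = none) := by
  refine pvDisjoint.imp ?_
  intro a b h
  by_cases hm : wl ∈ a.2
  · right; simp [pvKeyOf, h wl hm]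
  · left; simp [pvKeyOf, hm]

-- every hashtag in A's dict starts with '#'
theorem pvAllHash : ∀ kv ∈ dicPairs, ∀ v ∈ kv.2, PySem.Str.startswith v "#" = true := by decide

-- B's dict holds exactly A's pairs with the '#' stripped off the hashtag
set_option maxRecDepth 16384 in
theorem pvItemsEq :
    pvTAG2KEY.items
      = dicPairs.flatMap (fun kv => kv.2.map fun v => (PySem.Str.slice v (some 1) none, kv.1)) := by
  decide

-- dropping the leading '#' is injective on '#'-prefixed strings
theorem pvStripInj (v wl : String) (hv : PySem.Str.startswith v "#" = true)
    (hw : PySem.Str.startswith wl "#" = true) :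
    (PySem.Str.slice v (some 1) none = PySem.Str.slice wl (some 1) none) ↔ v = wl := by
  have hv' : v.toList = '#' :: v.toList.tail := by
    simp only [pysem] at hv
    obtain ⟨t, ht⟩ := hv
    simp [← ht]
  have hw' : wl.toList = '#' :: wl.toList.tail := by
    simp only [pysem] at hw
    obtain ⟨t, ht⟩ := hw
    simp [← ht]
  constructor
  · intro h
    have h2 : (PySem.Str.slice v (some 1) none).toList = (PySem.Str.slice wl (some 1) none).toList := by
      rw [h]
    simp only [pysem, PySem.List.slice_from_one] at h2
    apply String.toList_inj.mp
    rw [hv', hw', h2]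
  · intro h; rw [h]

-- first match over one stripped hashtag list keyed by a stripped word
theorem pvFindMapVals (vs : List String) (wl k : String)
    (hw : PySem.Str.startswith wl "#" = true)
    (h : ∀ v ∈ vs, PySem.Str.startswith v "#" = true) :
    (vs.map fun v => (PySem.Str.slice v (some 1) none, k)).find?
        (fun p => p.1 == PySem.Str.slice wl (some 1) none)
      = if wl ∈ vs then some (PySem.Str.slice wl (some 1) none, k) else none := by
  induction vs with
  | nil => simp
  | cons v t ih =>
    have hv := h v (List.mem_cons_self ..)
    have heq : (PySem.Str.slice v (some 1) none == PySem.Str.slice wl (some 1) none) = (v == wl) := by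
      rw [Bool.eq_iff_iff]; simp only [beq_iff_eq]; exact pvStripInj v wl hv hw
    simp only [List.map_cons, List.find?_cons, heq]
    by_cases hvw : v = wl
    · simp [hvw]
    · have hb : (v == wl) = false := by simp [hvw]
      rw [hb, ih (fun x hx => h x (List.mem_cons_of_mem _ hx))]
      by_cases hm : wl ∈ t
      · simp [List.mem_cons, hm]
      · simp [List.mem_cons, hm, Ne.symm hvw]

-- first match over the stripped flat pair list = A's forward key search
theorem pvFindFlat (ps : List (String × List String)) (wl : String)
    (hw : PySem.Str.startswith wl "#" = true)
    (hall : ∀ kv ∈ ps, ∀ v ∈ kv.2, PySem.Str.startswith v "#" = true) :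
    ((ps.flatMap fun kv => kv.2.map fun v => (PySem.Str.slice v (some 1) none, kv.1)).find?
        (fun p => p.1 == PySem.Str.slice wl (some 1) none)).map (·.2)
      = ps.findSome? (pvKeyOf wl) := by
  induction ps with
  | nil => rfl
  | cons kv rest ih =>
    simp only [List.flatMap_cons, List.find?_append]
    rw [pvFindMapVals kv.2 wl kv.1 hw (hall kv (List.mem_cons_self ..))]
    by_cases hm : wl ∈ kv.2
    · rw [if_pos hm]
      simp [pvKeyOf, hm, Option.or]
    · rw [if_neg hm, Option.none_or, ih (fun kv' h' => hall kv' (List.mem_cons_of_mem _ h'))]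
      simp [pvKeyOf, hm]

-- B's test-and-lookup equals A's forward key search, for every word
theorem pvLookEq (wl : String) : pvLook wl = dicPairs.findSome? (pvKeyOf wl) := by
  unfold pvLook
  by_cases hs : PySem.Str.startswith wl "#" = true
  · rw [if_pos hs]
    simp only [PySem.Dict.get?]
    rw [pvItemsEq]
    exact pvFindFlat dicPairs wl hs pvAllHash
  · rw [if_neg hs]
    symm
    rw [List.findSome?_eq_none_iff]
    intro kv hkv
    unfold pvKeyOf
    rw [if_neg]
    intro hm
    exact hs (pvAllHash kv hkv wl hm)

-- B's loop is a first-match search with default ""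
theorem pvScanBEq (m : PySem.Dict String String) (l : List String) :
    pvScan m l = (l.findSome? (fun w =>
      if PySem.Str.startswith (PySem.Str.lower w) "#" = true
      then m.get? (PySem.Str.slice (PySem.Str.lower w) (some 1) none) else none)).getD "" := by
  induction l with
  | nil => simp [pvScan]
  | cons w t ih =>
    rw [pvScan, List.findSome?_cons]
    by_cases hs : PySem.Str.startswith (PySem.Str.lower w) "#" = true
    · rw [if_pos hs, if_pos hs]
      cases h : m.get? (PySem.Str.slice (PySem.Str.lower w) (some 1) none) <;> simp [ih]
    · rw [if_neg hs, if_neg hs]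
      simp [ih]

-- ===== VERDICT (by name: the statement is the Claim_ definition above) =====
theorem topic_sort_spec : Claim_equal_topic_sort := by
  intro line _
  unfold Spec_topic_sort topic_sort topic_sort_alt
  rw [pvScanBEq]
  have hlk : (fun w => if PySem.Str.startswith (PySem.Str.lower w) "#" = true
      then pvTAG2KEY.get? (PySem.Str.slice (PySem.Str.lower w) (some 1) none) else none)
      = fun w => pvLook (PySem.Str.lower w) := by
    funext w; rw [pvLook]
  rw [hlk]
  have hstep : ∀ (res word : String),
      dicPairs.foldl
        (fun r kv => kv.2.foldl (fun r2 v => if v == PySem.Str.lower word then kv.1 else r2) r) res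
      = (dicPairs.reverse.findSome? (pvKeyOf (PySem.Str.lower word))).getD res := by
    intro res word
    have h1 : (fun (r : String) (kv : String × List String) =>
        kv.2.foldl (fun r2 v => if v == PySem.Str.lower word then kv.1 else r2) r)
        = fun r kv => (pvKeyOf (PySem.Str.lower word) kv).getD r := by
      funext r kv
      rw [pvFoldlEqIte kv.2 (PySem.Str.lower word) kv.1 r, pvKeyOf]
      by_cases hm : PySem.Str.lower word ∈ kv.2 <;> simp [hm]
    rw [h1, pvFoldlGetD]
  have h2 : (fun (res word : String) =>
      dicPairs.foldl
        (fun r kv => kv.2.foldl (fun r2 v => if v == PySem.Str.lower word then kv.1 else r2) r) res)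
      = fun res word => (pvLook (PySem.Str.lower word)).getD res := by
    funext res word
    rw [hstep res word, pvFindSomeRev _ _ (pvPairwiseKeyOf _), ← pvLookEq]
  rw [h2, pvFoldlGetD]
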